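-- pv_equiv track=rewrite | github.com/dwats250/trading-system | reports/options_sniper.py | _derive_trigger
-- ===== SOURCE A (Python) =====
-- def _derive_trigger(reasons: list[str]) -> str:
--     """Phase 2B single-source trigger mapper: first blocking reason → forward-looking condition."""
--     checks = [
--         ("regime",         "Regime shifts to align with setup bias"),
--         ("R:R",            "R:R improves to ≥ 2:1"),
--         ("Chart grade",    "Chart grade upgrades to A"),
--         ("No clear chart", "Clear breakout or breakdown structure forms"),
--         ("liquidity",      "Options liquidity improves"),
--     ]
--     for keyword, label in checks:
--         for r in reasons:
--             if keyword.lower() in r.lower():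
--                 return label
--     return reasons[0] if reasons else "Primary blocking condition resolves"
-- ===== SOURCE B (Python) =====
-- def _derive_trigger(reasons: list[str]) -> str:
--     checks = [
--         ("regime",         "Regime shifts to align with setup bias"),
--         ("R:R",            "R:R improves to ≥ 2:1"),
--         ("Chart grade",    "Chart grade upgrades to A"),
--         ("No clear chart", "Clear breakout or breakdown structure forms"),
--         ("liquidity",      "Options liquidity improves"),
--     ]
--     best = None
--     for r in reasons:
--         low = r.lower()
--         for i, (keyword, _label) in enumerate(checks):
--             if keyword.lower() in low and (best is None or i < best):
--                 best = i
--     if best is not None: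
--         return checks[best][1]
--     return reasons[0] if reasons else "Primary blocking condition resolves"
-- ===== Notes on version B (the rewrite author's own statement) =====
-- stated objective: alternative
-- what changed: Replaces A's keyword-major nested loops with early return by a single pass over the reasons that tracks the minimum matching keyword index in an accumulator and maps it to its label at the end.
import Mathlib
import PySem

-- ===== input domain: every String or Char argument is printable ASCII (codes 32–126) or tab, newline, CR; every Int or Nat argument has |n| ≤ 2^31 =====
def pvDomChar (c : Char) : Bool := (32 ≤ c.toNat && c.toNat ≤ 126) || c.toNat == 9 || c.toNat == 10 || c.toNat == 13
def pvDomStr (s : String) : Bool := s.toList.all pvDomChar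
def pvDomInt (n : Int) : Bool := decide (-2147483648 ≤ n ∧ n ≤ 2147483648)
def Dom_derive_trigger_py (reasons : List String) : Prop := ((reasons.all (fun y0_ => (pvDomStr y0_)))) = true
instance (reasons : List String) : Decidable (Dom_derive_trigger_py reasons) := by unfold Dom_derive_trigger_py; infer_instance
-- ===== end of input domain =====

-- B replaces A's keyword-major nested loops with one pass over reasons tracking the minimal matching keyword index (alternative decomposition, same cost).


-- ===== PORT A =====
def pvChecks : List (String × String) :=
  [("regime",         "Regime shifts to align with setup bias"),
   ("R:R",            "R:R improves to ≥ 2:1"),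
   ("Chart grade",    "Chart grade upgrades to A"),
   ("No clear chart", "Clear breakout or breakdown structure forms"),
   ("liquidity",      "Options liquidity improves")]

-- inner 'for r in reasons: if keyword.lower() in r.lower(): return label'
def pvAInner (kw label : String) (reasons : List String) : Option String :=
  match reasons with
  | [] => none
  | r :: rs =>
    if PySem.Str.isIn (PySem.Str.lower kw) (PySem.Str.lower r) then some label
    else pvAInner kw label rs

-- outer 'for keyword, label in checks: …'
def pvAOuter (checks : List (String × String)) (reasons : List String) : Option String :=
  match checks with
  | [] => none
  | (kw, label) :: cs =>
    match pvAInner kw label reasons with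
    | some l => some l
    | none => pvAOuter cs reasons

def derive_trigger_py (reasons : List String) : String :=
  match pvAOuter pvChecks reasons with
  | some l => l
  | none => match reasons with
            | r :: _ => r
            | [] => "Primary blocking condition resolves"

-- ===== PORT B =====
-- 'if keyword.lower() in low and (best is None or i < best): best = i'
def pvBUpdate (low : String) (best : Option Int) (ik : Int × (String × String)) : Option Int :=
  if PySem.Str.isIn (PySem.Str.lower ik.2.1) low &&
     (best.isNone || decide (ik.1 < best.getD 0)) then some ik.1 else best

def derive_trigger_py_alt (reasons : List String) : String :=
  let best := reasons.foldl
    (fun b r => (PySem.List.enumerate pvChecks).foldl (pvBUpdate (PySem.Str.lower r)) b) none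
  match best with
  | some i => (PySem.List.pyGetD pvChecks i ("", "")).2   -- checks[best][1]; best is always a valid index
  | none => match reasons with
            | r :: _ => r
            | [] => "Primary blocking condition resolves"

-- ===== PRECONDITION & SPEC =====
def Spec_derive_trigger_py (reasons : List String) (out : String) : Prop := out = derive_trigger_py_alt reasons
instance (reasons : List String) (out : String) : Decidable (Spec_derive_trigger_py reasons out) := by unfold Spec_derive_trigger_py; infer_instance

-- ===== CLAIM (what is proved, stated in full; the proofs are below) =====
def Claim_equal_derive_trigger_py : Prop := ∀ (reasons : List String), Dom_derive_trigger_py reasons → Spec_derive_trigger_py reasons (derive_trigger_py reasons)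

-- ===== LEMMAS AND PROOFS =====

-- the i-th keyword
def pvKw : Nat → String
  | 0 => "regime" | 1 => "R:R" | 2 => "Chart grade" | 3 => "No clear chart" | _ => "liquidity"

-- 'keyword.lower() in r.lower()' for keyword index i
def pvHit (i : Nat) (r : String) : Bool :=
  PySem.Str.isIn (PySem.Str.lower (pvKw i)) (PySem.Str.lower r)

-- min on Option Int (none = +∞)
def pvOmin (a b : Option Int) : Option Int :=
  match a, b with
  | none, b => b
  | a, none => a
  | some x, some y => some (min x y)

-- smallest keyword index matching a single reason
def pvRow (r : String) : Option Int :=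
  if pvHit 0 r then some 0 else if pvHit 1 r then some 1 else if pvHit 2 r then some 2
  else if pvHit 3 r then some 3 else if pvHit 4 r then some 4 else none

-- smallest keyword index matching any reason, as an if-chain
def pvChain (reasons : List String) : Option Int :=
  if reasons.any (pvHit 0) then some 0 else if reasons.any (pvHit 1) then some 1
  else if reasons.any (pvHit 2) then some 2 else if reasons.any (pvHit 3) then some 3
  else if reasons.any (pvHit 4) then some 4 else none

theorem pvOmin_assoc (a b c : Option Int) : pvOmin (pvOmin a b) c = pvOmin a (pvOmin b c) := by
  cases a <;> cases b <;> cases c <;> simp [pvOmin, min_assoc]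

-- one update step = conditional option-min with the index
theorem pvStep_eq (c : Bool) (i : Int) (b : Option Int) :
    (if c && (b.isNone || decide (i < b.getD 0)) then some i else b)
      = if c then pvOmin b (some i) else b := by
  cases c <;> cases b <;> simp [pvOmin]
  next n =>
    rcases lt_or_ge i n with h | h
    · simp [h, min_eq_right h.le]
    · simp [not_lt.mpr h, min_eq_left h]

theorem pvAInner_eq (kw label : String) (reasons : List String) :
    pvAInner kw label reasons =
      if reasons.any (fun r => PySem.Str.isIn (PySem.Str.lower kw) (PySem.Str.lower r))
      then some label else none := by
  induction reasons with
  | nil => simp [pvAInner]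
  | cons r rs ih =>
    simp only [pvAInner]
    rw [ih]
    cases h : PySem.Str.isIn (PySem.Str.lower kw) (PySem.Str.lower r) <;>
      simp only [PySem.Str.isIn_eq, PySem.Str.toList_lower] at h <;> simp [List.any_cons, h]

-- one reason's scan over the enumerated checks = pvOmin with its row
theorem pvBScan_eq (r : String) (b : Option Int) :
    (PySem.List.enumerate pvChecks).foldl (pvBUpdate (PySem.Str.lower r)) b
      = pvOmin b (pvRow r) := by
  have e : PySem.List.enumerate pvChecks =
      [(0, ("regime", "Regime shifts to align with setup bias")),
       (1, ("R:R", "R:R improves to ≥ 2:1")),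
       (2, ("Chart grade", "Chart grade upgrades to A")),
       (3, ("No clear chart", "Clear breakout or breakdown structure forms")),
       (4, ("liquidity", "Options liquidity improves"))] := rfl
  rw [e]
  simp only [List.foldl_cons, List.foldl_nil, pvBUpdate]
  rw [pvStep_eq, pvStep_eq, pvStep_eq, pvStep_eq, pvStep_eq]
  rw [show PySem.Str.isIn (PySem.Str.lower "regime") (PySem.Str.lower r) = pvHit 0 r from rfl,
      show PySem.Str.isIn (PySem.Str.lower "R:R") (PySem.Str.lower r) = pvHit 1 r from rfl,
      show PySem.Str.isIn (PySem.Str.lower "Chart grade") (PySem.Str.lower r) = pvHit 2 r from rfl,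
      show PySem.Str.isIn (PySem.Str.lower "No clear chart") (PySem.Str.lower r) = pvHit 3 r from rfl,
      show PySem.Str.isIn (PySem.Str.lower "liquidity") (PySem.Str.lower r) = pvHit 4 r from rfl]
  unfold pvRow
  cases h0 : pvHit 0 r <;> cases h1 : pvHit 1 r <;> cases h2 : pvHit 2 r <;>
    cases h3 : pvHit 3 r <;> cases h4 : pvHit 4 r <;> cases b <;>
    simp [pvOmin]

theorem pvFoldl_omin (reasons : List String) (b : Option Int) :
    reasons.foldl (fun b r => pvOmin b (pvRow r)) b
      = pvOmin b (reasons.foldl (fun b r => pvOmin b (pvRow r)) none) := by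
  induction reasons generalizing b with
  | nil => cases b <;> simp [pvOmin]
  | cons r rs ih =>
    simp only [List.foldl_cons]
    rw [ih, ih (pvOmin none (pvRow r)), ← pvOmin_assoc]
    cases pvRow r <;> simp [pvOmin]

-- option-min of two five-step if-chains is the if-chain of the disjunctions
theorem pvOmin_chain_abs (p0 p1 p2 p3 p4 a0 a1 a2 a3 a4 : Bool) :
    pvOmin (if p0 then some 0 else if p1 then some 1 else if p2 then some 2
      else if p3 then some 3 else if p4 then some 4 else none)
      (if a0 then some 0 else if a1 then some 1 else if a2 then some 2
       else if a3 then some 3 else if a4 then some 4 else none)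
    = (if (p0 || a0) then some 0 else if (p1 || a1) then some 1 else if (p2 || a2) then some 2
      else if (p3 || a3) then some 3 else if (p4 || a4) then some 4 else none) := by
  cases p0 <;> cases p1 <;> cases p2 <;> cases p3 <;> cases p4 <;>
    cases a0 <;> cases a1 <;> cases a2 <;> cases a3 <;> cases a4 <;> rfl

theorem pvOmin_row_chain (r : String) (rs : List String) :
    pvOmin (pvRow r) (pvChain rs) = pvChain (r :: rs) := by
  simp only [pvChain, pvRow, List.any_cons]
  exact pvOmin_chain_abs (pvHit 0 r) (pvHit 1 r) (pvHit 2 r) (pvHit 3 r) (pvHit 4 r)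
    (rs.any (pvHit 0)) (rs.any (pvHit 1)) (rs.any (pvHit 2)) (rs.any (pvHit 3)) (rs.any (pvHit 4))

theorem pvBest_eq_chain (reasons : List String) :
    reasons.foldl (fun b r => pvOmin b (pvRow r)) none = pvChain reasons := by
  induction reasons with
  | nil => simp [pvChain]
  | cons r rs ih =>
    rw [List.foldl_cons, pvFoldl_omin, ih]
    simp only [pvOmin]
    exact pvOmin_row_chain r rs

-- ===== VERDICT (by name: the statement is the Claim_ definition above) =====
theorem derive_trigger_py_spec : Claim_equal_derive_trigger_py := by
  intro reasons _
  unfold Spec_derive_trigger_py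
  unfold derive_trigger_py derive_trigger_py_alt
  have hf : (fun (b : Option Int) (r : String) =>
        (PySem.List.enumerate pvChecks).foldl (pvBUpdate (PySem.Str.lower r)) b)
      = fun b r => pvOmin b (pvRow r) := funext fun b => funext fun r => pvBScan_eq r b
  rw [hf, pvBest_eq_chain]
  simp only [pvAOuter, pvChecks, pvAInner_eq, pvChain]
  have e0 : (reasons.any fun r => PySem.Str.isIn (PySem.Str.lower "regime") (PySem.Str.lower r)) = reasons.any (pvHit 0) := rfl
  have e1 : (reasons.any fun r => PySem.Str.isIn (PySem.Str.lower "R:R") (PySem.Str.lower r)) = reasons.any (pvHit 1) := rfl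
  have e2 : (reasons.any fun r => PySem.Str.isIn (PySem.Str.lower "Chart grade") (PySem.Str.lower r)) = reasons.any (pvHit 2) := rfl
  have e3 : (reasons.any fun r => PySem.Str.isIn (PySem.Str.lower "No clear chart") (PySem.Str.lower r)) = reasons.any (pvHit 3) := rfl
  have e4 : (reasons.any fun r => PySem.Str.isIn (PySem.Str.lower "liquidity") (PySem.Str.lower r)) = reasons.any (pvHit 4) := rfl
  rw [e0, e1, e2, e3, e4]
  split_ifs <;> rfl
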